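-- pv_equiv track=rewrite | github.com/vinchinzu/euler | python/878.py | solve_root_quadratic
-- ===== SOURCE A (Python) =====
-- Poly = int
--
-- def poly_deg(a: Poly) -> int:
--     """Return the degree of polynomial a represented as an integer."""
--     return a.bit_length() - 1 if a > 0 else -1
--
-- def poly_mod(a: Poly, b: Poly) -> Poly:
--     if b == 0:
--         raise ValueError("Division by zero")
--     da = poly_deg(a)
--     db = poly_deg(b)
--     if da < db:
--         return a
--
--     while da >= db:
--         a ^= b << (da - db)
--         da = poly_deg(a)
--     return a
--
-- def poly_sq(a: Poly) -> Poly: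
--     # a(x)^2 = a(x^2)
--     res = 0
--     shift = 0
--     while a > 0:
--         if a & 1:
--             res |= 1 << shift
--         a >>= 1
--         shift += 2
--     return res
--
-- def solve_root_quadratic(c_val: Poly, p: Poly) -> int | None:
--     d = poly_deg(p)
--     if d % 2 == 1:
--         z = 0
--         term = c_val
--         for _ in range((d + 1) // 2):
--             z ^= term
--             term = poly_sq(term)
--             term = poly_mod(term, p)
--             term = poly_sq(term)
--             term = poly_mod(term, p)
--         return z
--
--     for z in range(1 << d):
--         val = poly_sq(z) ^ z
--         if poly_mod(val, p) == c_val: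
--             return z
--     return None
-- ===== SOURCE B (Python) =====
-- # B: linear-algebra reformulation. z -> z^2+z mod p is GF(2)-linear, so B never does
-- # polynomial long division: it builds a table R[j] = x^j mod p by one shift-and-
-- # conditional-xor per entry, applies the squaring/reduction maps by table lookups,
-- # and solves the even-degree case by scanning with the precomputed column matrix.
--
-- def _pow_table(p, d, length):
--     """R[j] = x^j mod p for j < length (p of degree d >= 1)."""
--     out = []
--     r = 1
--     for _ in range(length):
--         out.append(r)
--         r <<= 1
--         if (r >> d) & 1:
--             r ^= p
--     return out
--
-- def _spread(a):
--     """Square in GF(2)[x]: interleave zero bits."""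
--     r = 0
--     s = 0
--     while a > 0:
--         if a & 1:
--             r |= 1 << s
--         a >>= 1
--         s += 2
--     return r
--
-- def _apply(table, v):
--     """XOR of table[j] over the set bits j of v (linear-map application)."""
--     acc = 0
--     j = 0
--     while v > 0:
--         if v & 1:
--             acc ^= table[j]
--         v >>= 1
--         j += 1
--     return acc
--
-- def solve_root_quadratic(c_val, p):
--     d = p.bit_length() - 1 if p > 0 else -1
--     if d % 2 == 1:
--         m = (d + 1) // 2
--         if m == 0:
--             return 0
--         cb = c_val.bit_length() if c_val > 0 else 0
--         R = _pow_table(p, d, 2 * max(d, cb))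
--         z = 0
--         t = c_val
--         for _ in range(m):
--             z ^= t
--             t = _apply(R, _spread(t))
--             t = _apply(R, _spread(t))
--         return z
--     R = _pow_table(p, d, 2 * d)
--     C = [R[2 * j] ^ (1 << j) for j in range(d)]
--     for z in range(1 << d):
--         if _apply(C, z) == c_val:
--             return z
--     return None
-- ===== Notes on version B (the rewrite author's own statement) =====
-- stated objective: alternative
-- what changed: A reduces polynomials by repeated long division and squares per candidate; B exploits that squaring and reduction mod p are GF(2)-linear: it precomputes a table of x^j mod p by one shift-and-conditional-xor per entry and evaluates every squaring-and-reduction (and each scan candidate in the even-degree case) as an xor of table entries, so no long division is performed anywhere.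
import Mathlib
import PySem

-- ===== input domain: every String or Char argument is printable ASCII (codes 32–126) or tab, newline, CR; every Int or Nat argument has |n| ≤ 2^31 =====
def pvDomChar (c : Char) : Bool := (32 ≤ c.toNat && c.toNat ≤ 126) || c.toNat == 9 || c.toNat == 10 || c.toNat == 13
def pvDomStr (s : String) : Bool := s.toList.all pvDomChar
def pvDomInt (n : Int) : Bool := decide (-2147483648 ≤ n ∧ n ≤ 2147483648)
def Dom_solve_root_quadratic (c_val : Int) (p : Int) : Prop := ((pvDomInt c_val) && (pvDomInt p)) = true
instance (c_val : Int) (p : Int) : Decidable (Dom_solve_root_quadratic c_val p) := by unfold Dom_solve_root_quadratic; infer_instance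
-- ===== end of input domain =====

-- B replaces A's per-step polynomial long division by a precomputed table of
-- x^j mod p applied as a GF(2) linear map (xor of table entries); an alternative
-- algorithm with the same return value everywhere.

-- ===== PORT A =====

-- poly_deg: a.bit_length() - 1 if a > 0 else -1
def polyDeg (a : Int) : Int := if 0 < a then (PySem.Int.bitLength a : Int) - 1 else -1

-- termination lemma for A's division loop (cited by decreasing_by below)
theorem pvXorTopCancel {x y n : Nat} (hx1 : 2^n ≤ x) (hx2 : x < 2^(n+1))
    (hy1 : 2^n ≤ y) (hy2 : y < 2^(n+1)) : x ^^^ y < 2^n := by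
  apply Nat.lt_pow_two_of_testBit
  intro i hi
  rw [Nat.testBit_xor]
  rcases Nat.eq_or_lt_of_le hi with rfl | h
  · have hx : x.testBit n = true := by
      rw [Nat.testBit_eq_decide_div_mod_eq]
      have hp : 0 < 2^n := Nat.two_pow_pos n
      have h3 : x / 2^n < 2 := Nat.div_lt_of_lt_mul (by rw [pow_succ] at hx2; omega)
      have h4 : 1 ≤ x / 2^n := (Nat.le_div_iff_mul_le hp).2 (by omega)
      have hx5 : x / 2^n = 1 := by omega
      simp [hx5]
    have hy : y.testBit n = true := by
      rw [Nat.testBit_eq_decide_div_mod_eq]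
      have hp : 0 < 2^n := Nat.two_pow_pos n
      have h3 : y / 2^n < 2 := Nat.div_lt_of_lt_mul (by rw [pow_succ] at hy2; omega)
      have h4 : 1 ≤ y / 2^n := (Nat.le_div_iff_mul_le hp).2 (by omega)
      have hy5 : y / 2^n = 1 := by omega
      simp [hy5]
    simp [hx, hy]
  · have hx : x.testBit i = false :=
      Nat.testBit_lt_two_pow (lt_of_lt_of_le hx2 (Nat.pow_le_pow_right (by norm_num) h))
    have hy : y.testBit i = false :=
      Nat.testBit_lt_two_pow (lt_of_lt_of_le hy2 (Nat.pow_le_pow_right (by norm_num) h))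
    simp [hx, hy]

theorem pvXorTopLt (a p : Nat) (hp : p ≠ 0) (hs : Nat.size p ≤ Nat.size a) :
    a ^^^ (p <<< (Nat.size a - Nat.size p)) < a := by
  have hp1 : 1 ≤ Nat.size p := Nat.size_pos.2 (Nat.pos_of_ne_zero hp)
  have ha0 : a ≠ 0 := by
    intro h; subst h; simp [Nat.size_zero] at hs; omega
  have hsa1 : 1 ≤ Nat.size a := Nat.size_pos.2 (Nat.pos_of_ne_zero ha0)
  have hau : a < 2^(Nat.size a) := Nat.size_le.1 le_rfl
  have hal : 2^(Nat.size a - 1) ≤ a := Nat.lt_size.1 (by omega)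
  have hsize : (p <<< (Nat.size a - Nat.size p)).size = Nat.size a := by
    rw [Nat.size_shiftLeft hp]; omega
  have hbu : (p <<< (Nat.size a - Nat.size p)) < 2^(Nat.size a) := by
    exact Nat.size_le.1 (le_of_eq hsize)
  have hb0 : (p <<< (Nat.size a - Nat.size p)) ≠ 0 := by
    intro h; rw [h] at hsize; simp [Nat.size_zero] at hsize; omega
  have hbl : 2^(Nat.size a - 1) ≤ (p <<< (Nat.size a - Nat.size p)) := by
    exact Nat.lt_size.1 (by rw [hsize]; omega)
  have key : a ^^^ (p <<< (Nat.size a - Nat.size p)) < 2^(Nat.size a - 1) := by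
    have e : Nat.size a - 1 + 1 = Nat.size a := by omega
    exact pvXorTopCancel hal (by rw [e]; exact hau) hbl (by rw [e]; exact hbu)
  exact lt_of_lt_of_le key hal

-- A's poly_mod division loop, nonnegative core (all of A's calls have a ≥ 0, b > 0;
-- 'da >= db' on degrees is exactly 'size b ≤ size a')
def nmodA (a p : Nat) : Nat :=
  if h : p = 0 ∨ Nat.size a < Nat.size p then a
  else nmodA (a ^^^ (p <<< (Nat.size a - Nat.size p))) p
  termination_by a
  decreasing_by exact pvXorTopLt a p (by tauto) (by omega)

-- poly_mod (b == 0 branch is Python's raise, unreachable from the entry function)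
def poly_mod (a b : Int) : Int :=
  if b = 0 then 0
  else if a < 0 then a  -- da = -1 < db: return a
  else (nmodA a.toNat b.toNat : Int)

-- poly_sq's loop only runs while a > 0; res accumulates the spread bits
def nsqA (a : Nat) : Nat :=
  if a = 0 then 0 else a % 2 + 4 * nsqA (a / 2)
  termination_by a
  decreasing_by exact Nat.div_lt_self (Nat.pos_of_ne_zero (by assumption)) one_lt_two

def poly_sq (a : Int) : Int := (nsqA a.toNat : Int)

-- the odd-degree loop: state (z, term)
def oddA (p : Int) : Nat → Int × Int → Int × Int
  | 0, s => s
  | k+1, s =>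
      let z := PySem.Int.bxor s.1 s.2
      let t1 := poly_mod (poly_sq s.2) p
      let t2 := poly_mod (poly_sq t1) p
      oddA p k (z, t2)

-- the even-degree scan: for z in range(1 << d), countdown k, current z
def evenA (c_val p : Int) : Nat → Nat → Option Int
  | 0, _ => none
  | k+1, z =>
      if poly_mod (PySem.Int.bxor (poly_sq (z : Int)) (z : Int)) p = c_val then some (z : Int)
      else evenA c_val p k (z+1)

def solve_root_quadratic (c_val : Int) (p : Int) : Option Int :=
  let d := polyDeg p
  if PySem.Int.mod d 2 = 1 then
    some (oddA p (PySem.Int.floordiv (d+1) 2).toNat (0, c_val)).1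
  else
    evenA c_val p (1 <<< d.toNat) 0

-- ===== PORT B =====

-- _pow_table: out[j] = x^j mod p, built by shift and conditional xor
def powTabB (p d : Nat) : Nat → Nat → List Nat
  | 0, _ => []
  | k+1, r => r :: powTabB p d k (if ((r <<< 1) >>> d) % 2 = 1 then (r <<< 1) ^^^ p else (r <<< 1))

-- _spread: loop runs while a > 0
def spreadB (a : Nat) : Nat :=
  if a = 0 then 0 else a % 2 + 4 * spreadB (a / 2)
  termination_by a
  decreasing_by exact Nat.div_lt_self (Nat.pos_of_ne_zero (by assumption)) one_lt_two

-- _apply: xor of table[j] over set bits j of v (Python's table[j] is in range at every call)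
def applyB (tab : List Nat) (v : Nat) : Nat :=
  if v = 0 then 0
  else (if v % 2 = 1 then tab.headD 0 else 0) ^^^ applyB tab.tail (v / 2)
  termination_by v
  decreasing_by exact Nat.div_lt_self (Nat.pos_of_ne_zero (by assumption)) one_lt_two

-- odd-degree loop of B: state (z, t)
def oddB (R : List Nat) : Nat → Int × Int → Int × Int
  | 0, s => s
  | k+1, s =>
      let z := PySem.Int.bxor s.1 s.2
      let t1 := (applyB R (spreadB s.2.toNat) : Int)
      let t2 := (applyB R (spreadB t1.toNat) : Int)
      oddB R k (z, t2)

-- even-degree scan of B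
def scanB (C : List Nat) (c_val : Int) : Nat → Nat → Option Int
  | 0, _ => none
  | k+1, z => if (applyB C z : Int) = c_val then some (z : Int) else scanB C c_val k (z+1)

def solve_root_quadratic_alt (c_val : Int) (p : Int) : Option Int :=
  let d : Int := if 0 < p then (PySem.Int.bitLength p : Int) - 1 else -1
  if PySem.Int.mod d 2 = 1 then
    let m := (PySem.Int.floordiv (d+1) 2).toNat
    if m = 0 then some 0
    else
      let dn := d.toNat
      let cb := if 0 < c_val then PySem.Int.bitLength c_val else 0
      let R := powTabB p.toNat dn (2 * max dn cb) 1
      some (oddB R m (0, c_val)).1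
  else
    let dn := d.toNat
    let R := powTabB p.toNat dn (2 * dn) 1
    let C := (List.range dn).map (fun j => R.getD (2*j) 0 ^^^ (1 <<< j))
    scanB C c_val (1 <<< dn) 0

-- ===== PRECONDITION & SPEC =====
def Spec_solve_root_quadratic (c_val : Int) (p : Int) (out : Option Int) : Prop := out = solve_root_quadratic_alt c_val p
instance (c_val : Int) (p : Int) (out : Option Int) : Decidable (Spec_solve_root_quadratic c_val p out) := by unfold Spec_solve_root_quadratic; infer_instance

-- ===== CLAIM (what is proved, stated in full; the proofs are below) =====
def Claim_equal_solve_root_quadratic : Prop := ∀ (c_val : Int) (p : Int), Dom_solve_root_quadratic c_val p → Spec_solve_root_quadratic c_val p (solve_root_quadratic c_val p)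

-- ===== LEMMAS AND PROOFS =====

theorem nmodA_base {a p : Nat} (h : p = 0 ∨ Nat.size a < Nat.size p) : nmodA a p = a := by
  rw [nmodA]; simp [h]

theorem nmodA_step {a p : Nat} (hp : p ≠ 0) (h : Nat.size p ≤ Nat.size a) :
    nmodA a p = nmodA (a ^^^ (p <<< (Nat.size a - Nat.size p))) p := by
  rw [nmodA]; rw [dif_neg (by omega)]

theorem nmodA_lt {p : Nat} (hp : 0 < p) (a : Nat) : nmodA a p < 2^(Nat.size p - 1) := by
  have hsp : 1 ≤ Nat.size p := Nat.size_pos.2 hp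
  induction a using Nat.strong_induction_on with
  | _ a ih =>
    by_cases h : Nat.size a < Nat.size p
    · rw [nmodA_base (Or.inr h)]
      exact Nat.size_le.mp (by omega)
    · rw [nmodA_step (by omega) (by omega)]
      exact ih _ (pvXorTopLt a p (by omega) (by omega))

theorem pvTestBitTop {m n : Nat} (h1 : 2^n ≤ m) (h2 : m < 2^(n+1)) : m.testBit n = true := by
  rw [Nat.testBit_eq_decide_div_mod_eq]
  have hp : 0 < 2^n := Nat.two_pow_pos n
  have h3 : m / 2^n < 2 := Nat.div_lt_of_lt_mul (by rw [pow_succ] at h2; omega)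
  have h4 : 1 ≤ m / 2^n := (Nat.le_div_iff_mul_le hp).2 (by omega)
  have h5 : m / 2^n = 1 := by omega
  simp [h5]

theorem pvXorSizeEq {x y : Nat} (h : Nat.size x < Nat.size y) :
    Nat.size (x ^^^ y) = Nat.size y := by
  have hy0 : y ≠ 0 := by intro h0; subst h0; simp [Nat.size_zero] at h
  have hsy : 1 ≤ y.size := Nat.size_pos.2 (Nat.pos_of_ne_zero hy0)
  have hyu : y < 2^y.size := Nat.size_le.mp le_rfl
  have hyl : 2^(y.size-1) ≤ y := Nat.lt_size.mp (by omega)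
  have hxu : x < 2^(y.size-1) := Nat.size_le.mp (by omega)
  have hup : x ^^^ y < 2^y.size :=
    Nat.xor_lt_two_pow (lt_of_lt_of_le hxu (Nat.pow_le_pow_right (by norm_num) (by omega))) hyu
  have hlow : 2^(y.size-1) ≤ x ^^^ y := by
    apply Nat.ge_two_pow_of_testBit
    have hby : y.testBit (y.size-1) = true := by
      apply pvTestBitTop hyl; rw [show y.size - 1 + 1 = y.size by omega]; exact hyu
    have hbx : x.testBit (y.size-1) = false := Nat.testBit_lt_two_pow hxu
    simp [Nat.testBit_xor, hbx, hby]
  have h1 : (x^^^y).size ≤ y.size := Nat.size_le.mpr hup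
  have h2 : y.size - 1 < (x^^^y).size := Nat.lt_size.mpr hlow
  omega

theorem nmodA_xor_shift {p : Nat} (hp : 0 < p) (a k : Nat) :
    nmodA (a ^^^ (p <<< k)) p = nmodA a p := by
  have hsp : 1 ≤ Nat.size p := Nat.size_pos.2 hp
  have hp0 : p ≠ 0 := by omega
  induction a using Nat.strong_induction_on generalizing k with
  | _ a ih =>
    have hps : (p <<< k).size = p.size + k := Nat.size_shiftLeft hp0 k
    rcases lt_trichotomy (Nat.size a) (p.size + k) with hlt | heq | hgt
    · have hx : (a ^^^ (p <<< k)).size = p.size + k := by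
        rw [pvXorSizeEq (by omega)]; exact hps
      rw [nmodA_step hp0 (by omega)]
      rw [show (a ^^^ p <<< k).size - p.size = k by omega]
      rw [Nat.xor_assoc, Nat.xor_self, Nat.xor_zero]
    · rw [nmodA_step hp0 (a := a) (by omega)]
      rw [show Nat.size a - p.size = k by omega]
    · have hx : (a ^^^ (p <<< k)).size = a.size := by
        rw [Nat.xor_comm]; rw [pvXorSizeEq (by omega)]
      have ha' : a ^^^ p <<< (a.size - p.size) < a := pvXorTopLt a p hp0 (by omega)
      calc nmodA (a ^^^ p <<< k) p
          = nmodA ((a ^^^ p <<< k) ^^^ p <<< ((a ^^^ p <<< k).size - p.size)) p :=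
            nmodA_step hp0 (by omega)
        _ = nmodA ((a ^^^ p <<< (a.size - p.size)) ^^^ p <<< k) p := by
            rw [hx, Nat.xor_right_comm]
        _ = nmodA (a ^^^ p <<< (a.size - p.size)) p := ih _ ha' k
        _ = nmodA a p := (nmodA_step hp0 (by omega)).symm

theorem nmodA_xor_left {p : Nat} (hp : 0 < p) (a b : Nat) :
    nmodA (a ^^^ b) p = nmodA (nmodA a p ^^^ b) p := by
  have hsp : 1 ≤ Nat.size p := Nat.size_pos.2 hp
  have hp0 : p ≠ 0 := by omega
  induction a using Nat.strong_induction_on with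
  | _ a ih =>
    by_cases h : Nat.size a < Nat.size p
    · rw [nmodA_base (Or.inr h)]
    · rw [nmodA_step hp0 (a := a) (by omega)]
      rw [← ih _ (pvXorTopLt a p hp0 (by omega))]
      rw [show (a ^^^ p <<< (a.size - p.size)) ^^^ b
            = (a ^^^ b) ^^^ p <<< (a.size - p.size) from Nat.xor_right_comm a _ b]
      rw [nmodA_xor_shift hp]

theorem nmodA_of_lt {p : Nat} (hp : 0 < p) {a : Nat} (h : a < 2^(Nat.size p - 1)) :
    nmodA a p = a := by
  have hsp : 1 ≤ Nat.size p := Nat.size_pos.2 hp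
  exact nmodA_base (Or.inr (by have := Nat.size_le.mpr h; omega))

theorem nmodA_xor {p : Nat} (hp : 0 < p) (a b : Nat) :
    nmodA (a ^^^ b) p = nmodA a p ^^^ nmodA b p := by
  calc nmodA (a ^^^ b) p
      = nmodA (nmodA a p ^^^ b) p := nmodA_xor_left hp a b
    _ = nmodA (b ^^^ nmodA a p) p := by rw [Nat.xor_comm]
    _ = nmodA (nmodA b p ^^^ nmodA a p) p := nmodA_xor_left hp b _
    _ = nmodA a p ^^^ nmodA b p := by
        rw [nmodA_of_lt hp (Nat.xor_lt_two_pow (nmodA_lt hp b) (nmodA_lt hp a))]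
        exact Nat.xor_comm _ _

theorem nmodA_shift1 {p : Nat} (hp : 0 < p) (a : Nat) :
    nmodA (a <<< 1) p = nmodA ((nmodA a p) <<< 1) p := by
  have hsp : 1 ≤ Nat.size p := Nat.size_pos.2 hp
  have hp0 : p ≠ 0 := by omega
  induction a using Nat.strong_induction_on with
  | _ a ih =>
    by_cases h : Nat.size a < Nat.size p
    · rw [nmodA_base (Or.inr h)]
    · rw [nmodA_step hp0 (a := a) (by omega)]
      rw [← ih _ (pvXorTopLt a p hp0 (by omega))]
      rw [show (a ^^^ p <<< (a.size - p.size)) <<< 1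
            = (a <<< 1) ^^^ p <<< (a.size - p.size + 1) by
          rw [Nat.shiftLeft_xor_distrib, Nat.shiftLeft_add]]
      rw [nmodA_xor_shift hp]

-- B's table step applied to a reduced value is x * r mod p
theorem stepB_eq {p : Nat} (hp : 0 < p) (r : Nat) (hr : r < 2^(Nat.size p - 1)) :
    (if ((r <<< 1) >>> (Nat.size p - 1)) % 2 = 1 then (r <<< 1) ^^^ p else (r <<< 1))
      = nmodA (r <<< 1) p := by
  have hsp : 1 ≤ Nat.size p := Nat.size_pos.2 hp
  have hpu : p < 2^(Nat.size p) := Nat.size_le.mp le_rfl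
  have hpl : 2^(Nat.size p - 1) ≤ p := Nat.lt_size.mp (by omega)
  have hru : r <<< 1 < 2^(Nat.size p - 1 + 1) := by
    rw [Nat.shiftLeft_eq, pow_succ]; omega
  rw [Nat.shiftRight_eq_div_pow]
  by_cases hb : 2^(Nat.size p - 1) ≤ r <<< 1
  · have hdiv : (r <<< 1) / 2^(Nat.size p - 1) = 1 := by
      have h3 : (r <<< 1) / 2^(Nat.size p - 1) < 2 :=
        Nat.div_lt_of_lt_mul (by rw [pow_succ] at hru; omega)
      have h4 : 1 ≤ (r <<< 1) / 2^(Nat.size p - 1) :=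
        (Nat.le_div_iff_mul_le (Nat.two_pow_pos _)).2 (by omega)
      omega
    rw [if_pos (by rw [hdiv])]
    have hsz : (r <<< 1).size = Nat.size p := by
      have h1 : (r <<< 1).size ≤ Nat.size p :=
        Nat.size_le.mpr (by rw [show Nat.size p = Nat.size p - 1 + 1 by omega]; exact hru)
      have h2 : Nat.size p - 1 < (r <<< 1).size := Nat.lt_size.mpr hb
      omega
    rw [nmodA_step (by omega) (by omega), hsz, Nat.sub_self, Nat.shiftLeft_zero]
    rw [nmodA_of_lt hp]
    exact pvXorTopCancel hb (by rw [show Nat.size p - 1 + 1 = Nat.size p from by omega] at hru ⊢; omega)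
      hpl (by rw [show Nat.size p - 1 + 1 = Nat.size p from by omega]; omega)
  · rw [if_neg (by
      have : (r <<< 1) / 2^(Nat.size p - 1) = 0 := Nat.div_eq_of_lt (by omega)
      rw [this]; omega)]
    exact (nmodA_of_lt hp (by omega)).symm

theorem powTabB_getD {p : Nat} (hp : 0 < p) :
    ∀ (n i j0 r : Nat), i < n → r = nmodA (2^j0) p →
      (powTabB p (Nat.size p - 1) n r).getD i 0 = nmodA (2^(j0+i)) p := by
  intro n
  induction n with
  | zero => intro i j0 r hi _; omega
  | succ n ih =>
    intro i j0 r hi hr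
    cases i with
    | zero => simpa [powTabB] using hr
    | succ i =>
      show (powTabB p (Nat.size p - 1) n _).getD i 0 = _
      rw [show j0 + (i+1) = (j0+1) + i by omega]
      apply ih i (j0+1) _ (by omega)
      have hrlt : r < 2^(Nat.size p - 1) := hr ▸ nmodA_lt hp (2^j0)
      rw [stepB_eq hp r hrlt, hr, ← nmodA_shift1 hp]
      congr 1
      rw [Nat.shiftLeft_eq]; ring

-- disjoint xor is addition
theorem pvXorAdd (n a x : Nat) (hx : x < 2^n) : (a * 2^n) ^^^ x = a * 2^n + x := by
  apply Nat.eq_of_testBit_eq; intro i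
  rw [mul_comm a (2^n)]
  rw [Nat.testBit_xor, Nat.testBit_two_pow_mul_add a hx i]
  have h0 : (2^n * a).testBit i = if i < n then false else a.testBit (i-n) := by
    have := Nat.testBit_two_pow_mul_add a (b := 0) (Nat.two_pow_pos n) i
    simpa using this
  rw [h0]
  by_cases h : i < n
  · simp [h]
  · have : x.testBit i = false :=
      Nat.testBit_lt_two_pow (lt_of_lt_of_le hx (Nat.pow_le_pow_right (by norm_num) (by omega)))
    simp [h, this]

theorem pvGetDTail (T : List Nat) (i : Nat) : T.tail.getD i 0 = T.getD (i+1) 0 := by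
  cases T <;> simp [List.getD]

theorem pvSizeDiv2 {v : Nat} (h : v ≠ 0) : Nat.size v = Nat.size (v/2) + 1 := by
  by_cases h2 : v / 2 = 0
  · have hv1 : v = 1 := by omega
    subst hv1; rfl
  · have hs : 1 ≤ (v/2).size := Nat.size_pos.2 (Nat.pos_of_ne_zero h2)
    have hu : v / 2 < 2^(v/2).size := Nat.size_le.mp le_rfl
    have hl : 2^((v/2).size - 1) ≤ v / 2 := Nat.lt_size.mp (by omega)
    have hvu : v < 2^((v/2).size + 1) := by rw [pow_succ]; omega
    have hvl : 2^(v/2).size ≤ v := by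
      calc 2^(v/2).size = 2^((v/2).size - 1) * 2 := by
            rw [← pow_succ]; congr 1; omega
        _ ≤ (v/2) * 2 := by omega
        _ ≤ v := by omega
    have h1 : v.size ≤ (v/2).size + 1 := Nat.size_le.mpr hvu
    have h2' : (v/2).size < v.size := Nat.lt_size.mpr hvl
    omega

theorem pvBitSplit (v j : Nat) : v <<< j = ((v/2) <<< (j+1)) ^^^ ((v % 2) * 2^j) := by
  have hx : (v % 2) * 2^j < 2^(j+1) := by
    have h2 : v % 2 < 2 := Nat.mod_lt v (by norm_num)
    rw [pow_succ]
    nlinarith [Nat.two_pow_pos j]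
  rw [Nat.shiftLeft_eq, Nat.shiftLeft_eq, pvXorAdd (j+1) (v/2) _ hx]
  conv_lhs => rw [← Nat.div_add_mod v 2]
  rw [pow_succ]; ring

theorem nmodA_zero {p : Nat} (hp : 0 < p) : nmodA 0 p = 0 :=
  nmodA_of_lt hp (Nat.two_pow_pos _)

theorem applyB_nmod {p : Nat} (hp : 0 < p) :
    ∀ (v : Nat) (T : List Nat) (j0 : Nat), (∀ i, i < Nat.size v → T.getD i 0 = nmodA (2^(j0+i)) p) →
      applyB T v = nmodA (v <<< j0) p := by
  intro v
  induction v using Nat.strong_induction_on with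
  | _ v ih =>
    intro T j0 hT
    by_cases hv : v = 0
    · subst hv
      rw [applyB]; simp [Nat.zero_shiftLeft]
      exact (nmodA_zero hp).symm
    · rw [applyB, if_neg hv]
      have hsz : 1 ≤ v.size := Nat.size_pos.2 (Nat.pos_of_ne_zero hv)
      have hhead : T.headD 0 = nmodA (2^j0) p := by
        have := hT 0 (by omega)
        cases T <;> simpa [List.getD] using this
      have htail : ∀ i, i < (v/2).size → T.tail.getD i 0 = nmodA (2^((j0+1)+i)) p := by
        intro i hi
        rw [pvGetDTail]
        rw [show (j0+1)+i = j0+(i+1) by omega]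
        exact hT (i+1) (by rw [pvSizeDiv2 hv]; omega)
      have hrec := ih (v/2) (Nat.div_lt_self (Nat.pos_of_ne_zero hv) one_lt_two) T.tail (j0+1) htail
      rw [hrec]
      by_cases hodd : v % 2 = 1
      · rw [if_pos hodd, hhead, ← nmodA_xor hp]
        congr 1
        rw [pvBitSplit v j0, hodd, one_mul]
        exact Nat.xor_comm _ _
      · rw [if_neg hodd, Nat.zero_xor]
        congr 1
        rw [pvBitSplit v j0]
        have hm0 : v % 2 = 0 := by omega
        rw [hm0, zero_mul, Nat.xor_zero]

theorem spreadB_eq (a : Nat) : spreadB a = nsqA a := by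
  induction a using Nat.strong_induction_on with
  | _ a ih =>
    rw [spreadB, nsqA]
    by_cases h : a = 0
    · simp [h]
    · rw [if_neg h, if_neg h, ih (a/2) (Nat.div_lt_self (Nat.pos_of_ne_zero h) one_lt_two)]

theorem nsqA_lt (a : Nat) : nsqA a < 2^(2 * Nat.size a) := by
  induction a using Nat.strong_induction_on with
  | _ a ih =>
    rw [nsqA]
    by_cases h : a = 0
    · simp [h]
    · rw [if_neg h]
      have h1 := ih (a/2) (Nat.div_lt_self (Nat.pos_of_ne_zero h) one_lt_two)
      have h2 : a % 2 < 2 := Nat.mod_lt a (by norm_num)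
      rw [pvSizeDiv2 h]
      rw [show 2 * ((a/2).size + 1) = 2 * (a/2).size + 2 by ring, pow_add]
      have h3 : (2:Nat)^2 = 4 := by norm_num
      rw [h3]
      omega

theorem nsqA_size (a : Nat) : Nat.size (nsqA a) ≤ 2 * Nat.size a :=
  Nat.size_le.mpr (nsqA_lt a)

theorem applyB_col {p : Nat} (hp : 0 < p) :
    ∀ (v : Nat) (T : List Nat) (j0 : Nat),
      (∀ i, i < Nat.size v → T.getD i 0 = nmodA (2^(2*(j0+i))) p ^^^ 2^(j0+i)) →
      applyB T v = nmodA ((nsqA v) <<< (2*j0)) p ^^^ (v <<< j0) := by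
  intro v
  induction v using Nat.strong_induction_on with
  | _ v ih =>
    intro T j0 hT
    by_cases hv : v = 0
    · subst hv
      rw [applyB]; simp [nsqA, Nat.zero_shiftLeft]
      exact (nmodA_zero hp).symm
    · rw [applyB, if_neg hv]
      have hsz : 1 ≤ v.size := Nat.size_pos.2 (Nat.pos_of_ne_zero hv)
      have hhead : T.headD 0 = nmodA (2^(2*j0)) p ^^^ 2^j0 := by
        have := hT 0 (by omega)
        cases T <;> simpa [List.getD] using this
      have htail : ∀ i, i < (v/2).size →
          T.tail.getD i 0 = nmodA (2^(2*((j0+1)+i))) p ^^^ 2^((j0+1)+i) := by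
        intro i hi
        rw [pvGetDTail]
        rw [show (j0+1)+i = j0+(i+1) by omega]
        exact hT (i+1) (by rw [pvSizeDiv2 hv]; omega)
      have hrec := ih (v/2) (Nat.div_lt_self (Nat.pos_of_ne_zero hv) one_lt_two) T.tail (j0+1) htail
      rw [hrec]
      have hsqsplit : (nsqA v) <<< (2*j0)
          = ((nsqA (v/2)) <<< (2*(j0+1))) ^^^ ((v % 2) * 2^(2*j0)) := by
        have hxlt : (v % 2) * 2^(2*j0) < 2^(2*(j0+1)) := by
          have h2 : v % 2 < 2 := Nat.mod_lt v (by norm_num)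
          rw [show 2*(j0+1) = 2*j0+2 by ring, pow_add]
          nlinarith [Nat.two_pow_pos (2*j0)]
        rw [Nat.shiftLeft_eq, Nat.shiftLeft_eq, pvXorAdd (2*(j0+1)) (nsqA (v/2)) _ hxlt]
        rw [nsqA, if_neg hv]
        rw [show 2*(j0+1) = 2*j0+2 by ring, pow_add]
        have h3 : (2:Nat)^2 = 4 := by norm_num
        rw [h3]; ring
      have hzsplit : v <<< j0 = ((v/2) <<< (j0+1)) ^^^ ((v % 2) * 2^j0) := pvBitSplit v j0
      by_cases hodd : v % 2 = 1
      · rw [if_pos hodd, hhead]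
        calc (nmodA (2^(2*j0)) p ^^^ 2^j0) ^^^
              (nmodA ((nsqA (v/2)) <<< (2*(j0+1))) p ^^^ ((v/2) <<< (j0+1)))
            = (nmodA (2^(2*j0)) p ^^^ nmodA ((nsqA (v/2)) <<< (2*(j0+1))) p) ^^^
              (2^j0 ^^^ ((v/2) <<< (j0+1))) := by
              rw [Nat.xor_assoc, Nat.xor_assoc]
              congr 1
              rw [← Nat.xor_assoc, ← Nat.xor_assoc]
              congr 1
              exact Nat.xor_comm _ _
          _ = nmodA ((nsqA v) <<< (2*j0)) p ^^^ (v <<< j0) := by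
              congr 1
              · rw [← nmodA_xor hp]
                congr 1
                rw [hsqsplit, hodd, one_mul, Nat.xor_comm]
              · rw [hzsplit, hodd, one_mul, Nat.xor_comm]
      · rw [if_neg hodd, Nat.zero_xor]
        have hm0 : v % 2 = 0 := by omega
        rw [hsqsplit, hzsplit, hm0]; simp

theorem bitLength_eq_size (n : Nat) : PySem.Int.bitLength (n : Int) = n.size := by
  induction n using Nat.strong_induction_on with
  | _ n ih =>
    by_cases h : n = 0
    · subst h; simp [PySem.Int.bitLength_zero, Nat.size_zero]
    · rw [PySem.Int.bitLength_natCast (Nat.pos_of_ne_zero h)]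
      rw [ih (n/2) (Nat.div_lt_self (Nat.pos_of_ne_zero h) one_lt_two)]
      exact (pvSizeDiv2 h).symm

-- ---- Int/Nat glue ----

theorem poly_mod_eq (a p : Int) (hp : 0 < p) (ha : 0 ≤ a) :
    poly_mod a p = (nmodA a.toNat p.toNat : Int) := by
  unfold poly_mod
  rw [if_neg (by omega), if_neg (by omega)]

theorem applyR_eq {pn : Nat} (h2 : 2 ≤ pn.size) (L x : Nat) (hx : Nat.size x ≤ L) :
    applyB (powTabB pn (pn.size - 1) L 1) x = nmodA x pn := by
  have hp : 0 < pn := Nat.size_pos.1 (by omega)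
  have h1 : nmodA 1 pn = 1 := nmodA_of_lt hp (by
    have : (2:Nat)^1 ≤ 2^(pn.size - 1) := Nat.pow_le_pow_right (by norm_num) (by omega)
    omega)
  have hT : ∀ i, i < Nat.size x →
      (powTabB pn (pn.size - 1) L 1).getD i 0 = nmodA (2^(0+i)) pn := by
    intro i hi
    exact powTabB_getD hp L i 0 1 (by omega) (by simpa using h1.symm)
  have := applyB_nmod hp x (powTabB pn (pn.size - 1) L 1) 0 hT
  simpa using this

-- one step of the odd-degree loop agrees (and yields a reduced value)
theorem odd_step_eq (c p : Int) (hp : 0 < p) (h2 : 2 ≤ p.toNat.size) (L : Nat)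
    (hL : 2 * max (p.toNat.size - 1) (Nat.size c.toNat) ≤ L) (t : Int)
    (ht : t = c ∨ (0 ≤ t ∧ Nat.size t.toNat ≤ p.toNat.size - 1)) :
    (applyB (powTabB p.toNat (p.toNat.size - 1) L 1) (spreadB t.toNat) : Int)
      = poly_mod (poly_sq t) p := by
  have hple : 0 < p.toNat := Nat.size_pos.1 (by omega)
  have hsz : Nat.size t.toNat ≤ max (p.toNat.size - 1) (Nat.size c.toNat) := by
    rcases ht with h | ⟨_, h⟩
    · subst h; exact le_max_right _ _
    · exact le_trans h (le_max_left _ _)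
  rw [spreadB_eq]
  rw [applyR_eq h2 L _ (le_trans (nsqA_size t.toNat) (by omega))]
  rw [show poly_sq t = ((nsqA t.toNat : Nat) : Int) from rfl]
  rw [poly_mod_eq _ p hp (by positivity)]
  rw [Int.toNat_natCast]

theorem odd_loop_eq (c p : Int) (hp : 0 < p) (h2 : 2 ≤ p.toNat.size) (L : Nat)
    (hL : 2 * max (p.toNat.size - 1) (Nat.size c.toNat) ≤ L) :
    ∀ (m : Nat) (z t : Int), (t = c ∨ (0 ≤ t ∧ Nat.size t.toNat ≤ p.toNat.size - 1)) →
      oddA p m (z, t) = oddB (powTabB p.toNat (p.toNat.size - 1) L 1) m (z, t) := by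
  have hple : 0 < p.toNat := Nat.size_pos.1 (by omega)
  have e : ∀ u : Int, poly_mod (poly_sq u) p = ((nmodA (nsqA u.toNat) p.toNat : Nat) : Int) := by
    intro u
    rw [show poly_sq u = ((nsqA u.toNat : Nat) : Int) from rfl,
        poly_mod_eq _ p hp (by positivity), Int.toNat_natCast]
  have hinv : ∀ s : Int, (∃ X, s = ((nmodA X p.toNat : Nat) : Int)) →
      (s = c ∨ (0 ≤ s ∧ Nat.size s.toNat ≤ p.toNat.size - 1)) := by
    rintro s ⟨X, rfl⟩
    right
    refine ⟨by positivity, ?_⟩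
    rw [Int.toNat_natCast]
    exact Nat.size_le.mpr (nmodA_lt hple _)
  intro m
  induction m with
  | zero => intro z t _; rfl
  | succ m ih =>
    intro z t ht
    show oddA p m (PySem.Int.bxor z t, poly_mod (poly_sq (poly_mod (poly_sq t) p)) p)
       = oddB (powTabB p.toNat (p.toNat.size - 1) L 1) m (PySem.Int.bxor z t,
           ((applyB (powTabB p.toNat (p.toNat.size - 1) L 1)
             (spreadB (((applyB (powTabB p.toNat (p.toNat.size - 1) L 1) (spreadB t.toNat) : Nat) : Int)).toNat) : Nat) : Int))
    have hstep1 := odd_step_eq c p hp h2 L hL t ht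
    have ht1 : poly_mod (poly_sq t) p = c ∨
        (0 ≤ poly_mod (poly_sq t) p ∧ Nat.size (poly_mod (poly_sq t) p).toNat ≤ p.toNat.size - 1) :=
      hinv _ ⟨_, e t⟩
    have hstep2 := odd_step_eq c p hp h2 L hL (poly_mod (poly_sq t) p) ht1
    rw [hstep1, hstep2]
    exact ih _ _ (hinv _ ⟨_, e _⟩)

-- ---- even branch ----

theorem even_pred_eq (c p : Int) (hp : 0 < p) (z : Nat)
    (hz : z < 2^(p.toNat.size - 1)) :
    poly_mod (PySem.Int.bxor (poly_sq (z : Int)) (z : Int)) p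
      = (applyB ((List.range (p.toNat.size - 1)).map
          (fun j => (powTabB p.toNat (p.toNat.size - 1) (2*(p.toNat.size - 1)) 1).getD (2*j) 0 ^^^ (1 <<< j))) z : Int) := by
  have hple : 0 < p.toNat := by omega
  have hsz1 : 1 ≤ p.toNat.size := Nat.size_pos.2 hple
  have hA : poly_mod (PySem.Int.bxor (poly_sq (z : Int)) (z : Int)) p
      = ((nmodA (nsqA z ^^^ z) p.toNat : Nat) : Int) := by
    rw [show poly_sq (z : Int) = ((nsqA z : Nat) : Int) by
      show ((nsqA (z : Int).toNat : Nat) : Int) = _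
      rw [Int.toNat_natCast]]
    rw [PySem.Int.bxor_natCast]
    rw [poly_mod_eq _ p hp (by positivity), Int.toNat_natCast]
  rw [hA]
  by_cases hd : p.toNat.size - 1 = 0
  · rw [hd] at hz
    have hz0 : z = 0 := by simpa using hz
    subst hz0
    rw [applyB]
    simp [nsqA, nmodA_zero hple]
  · have h2 : 2 ≤ p.toNat.size := by omega
    have h1 : nmodA 1 p.toNat = 1 := nmodA_of_lt hple (by
      have : (2:Nat)^1 ≤ 2^(p.toNat.size - 1) := Nat.pow_le_pow_right (by norm_num) (by omega)
      omega)
    have hzsz : Nat.size z ≤ p.toNat.size - 1 := Nat.size_le.mpr hz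
    have hT : ∀ i, i < Nat.size z →
        ((List.range (p.toNat.size - 1)).map
          (fun j => (powTabB p.toNat (p.toNat.size - 1) (2*(p.toNat.size - 1)) 1).getD (2*j) 0 ^^^ (1 <<< j))).getD i 0
        = nmodA (2^(2*(0+i))) p.toNat ^^^ 2^(0+i) := by
      intro i hi
      have hilt : i < p.toNat.size - 1 := by omega
      rw [List.getD_eq_getElem?_getD, List.getElem?_map, List.getElem?_range hilt]
      simp only [Option.map_some, Option.getD_some]
      rw [powTabB_getD hple _ (2*i) 0 1 (by omega) (by simpa using h1.symm)]
      rw [Nat.shiftLeft_eq, one_mul, Nat.zero_add]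
      rw [Nat.zero_add]
    rw [applyB_col hple z _ 0 hT]
    simp only [Nat.mul_zero, Nat.shiftLeft_zero]
    rw [nmodA_xor hple, nmodA_of_lt hple hz]

theorem scan_loop_eq (c p : Int) (C : List Nat) (N : Nat)
    (hC : ∀ z : Nat, z < N →
      poly_mod (PySem.Int.bxor (poly_sq (z : Int)) (z : Int)) p = (applyB C z : Int)) :
    ∀ (k z : Nat), z + k ≤ N → evenA c p k z = scanB C c k z := by
  intro k
  induction k with
  | zero => intro z _; rfl
  | succ k ih =>
    intro z hzk
    show (if poly_mod (PySem.Int.bxor (poly_sq (z : Int)) (z : Int)) p = c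
          then some (z : Int) else evenA c p k (z+1))
       = (if ((applyB C z : Nat) : Int) = c then some (z : Int) else scanB C c k (z+1))
    rw [hC z (by omega)]
    by_cases h : ((applyB C z : Nat) : Int) = c
    · rw [if_pos h, if_pos h]
    · rw [if_neg h, if_neg h]
      exact ih (z+1) (by omega)

-- ===== VERDICT (by name: the statement is the Claim_ definition above) =====
theorem solve_root_quadratic_spec : Claim_equal_solve_root_quadratic := by
  intro c p _hDom
  show solve_root_quadratic c p = solve_root_quadratic_alt c p
  show (if PySem.Int.mod (polyDeg p) 2 = 1
        then some (oddA p (PySem.Int.floordiv (polyDeg p + 1) 2).toNat (0, c)).1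
        else evenA c p (1 <<< (polyDeg p).toNat) 0)
      = (if PySem.Int.mod (polyDeg p) 2 = 1
         then (if (PySem.Int.floordiv (polyDeg p + 1) 2).toNat = 0 then some 0
               else some (oddB (powTabB p.toNat (polyDeg p).toNat
                   (2 * max (polyDeg p).toNat (if 0 < c then PySem.Int.bitLength c else 0)) 1)
                 (PySem.Int.floordiv (polyDeg p + 1) 2).toNat (0, c)).1)
         else scanB ((List.range (polyDeg p).toNat).map
             (fun j => (powTabB p.toNat (polyDeg p).toNat (2 * (polyDeg p).toNat) 1).getD (2*j) 0 ^^^ (1 <<< j)))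
           c (1 <<< (polyDeg p).toNat) 0)
  by_cases hp : 0 < p
  · have hple : 0 < p.toNat := by omega
    have hsz1 : 1 ≤ p.toNat.size := Nat.size_pos.2 hple
    have hbl : PySem.Int.bitLength p = p.toNat.size := by
      have h := bitLength_eq_size p.toNat
      rw [Int.toNat_of_nonneg (by omega : (0:Int) ≤ p)] at h
      exact h
    have hdval : polyDeg p = ((p.toNat.size - 1 : Nat) : Int) := by
      unfold polyDeg; rw [if_pos hp, hbl]; omega
    have hdn : (polyDeg p).toNat = p.toNat.size - 1 := by
      rw [hdval]; exact Int.toNat_natCast _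
    by_cases hpar : (p.toNat.size - 1) % 2 = 1
    · -- odd degree
      have hcond : PySem.Int.mod (polyDeg p) 2 = 1 := by
        rw [hdval, show (2:Int) = ((2:Nat):Int) from rfl, PySem.Int.mod_natCast, hpar]
        rfl
      rw [if_pos hcond, if_pos hcond]
      have h2 : 2 ≤ p.toNat.size := by omega
      have hm : (PySem.Int.floordiv (polyDeg p + 1) 2).toNat = p.toNat.size / 2 := by
        rw [show polyDeg p + 1 = ((p.toNat.size : Nat) : Int) by rw [hdval]; omega]
        rw [show (2:Int) = ((2:Nat):Int) from rfl, PySem.Int.floordiv_natCast]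
        exact Int.toNat_natCast _
      have hcb : (if 0 < c then PySem.Int.bitLength c else 0) = Nat.size c.toNat := by
        by_cases hc : 0 < c
        · have h := bitLength_eq_size c.toNat
          rw [Int.toNat_of_nonneg (by omega : (0:Int) ≤ c)] at h
          rw [if_pos hc, h]
        · rw [if_neg hc, Int.toNat_of_nonpos (by omega), Nat.size_zero]
      rw [hm, hdn, hcb]
      rw [if_neg (by omega)]
      rw [odd_loop_eq c p hp h2 _ le_rfl (p.toNat.size / 2) 0 c (Or.inl rfl)]
    · -- even degree
      have hcond : ¬ PySem.Int.mod (polyDeg p) 2 = 1 := by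
        rw [hdval, show (2:Int) = ((2:Nat):Int) from rfl, PySem.Int.mod_natCast]
        intro h
        have : (p.toNat.size - 1) % 2 = 1 := by exact_mod_cast h
        omega
      rw [if_neg hcond, if_neg hcond, hdn]
      apply scan_loop_eq c p _ (2^(p.toNat.size - 1))
        (fun z hz => even_pred_eq c p hp z hz)
      rw [Nat.shiftLeft_eq, one_mul]
      omega
  · -- p <= 0: degree -1, treated as odd, zero iterations
    have hd : polyDeg p = -1 := by unfold polyDeg; rw [if_neg hp]
    rw [hd]
    rw [if_pos (by decide), if_pos (by decide)]
    rw [show (PySem.Int.floordiv ((-1:Int) + 1) 2).toNat = 0 from by decide]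
    rw [if_pos rfl]
    rfl
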